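-- pv_equiv track=rewrite | github.com/lutzfinger/SAI-baseversion | app/agents/slack_eval_regression.py | _outcome_matches
-- ===== SOURCE A (Python) =====
-- def _outcome_matches(expected: str, actual: str) -> bool:
--     if expected == actual:
--         return True
--     # "_or_clarify" suffix means either outcome is OK.
--     if "_or_" in expected:
--         options = expected.split("_or_")
--         # Reconstruct full outcome names from the split parts.
--         # e.g. "proposed_llm_example_or_clarify" → ["proposed_llm_example", "clarify"]
--         # First option is full; later options are bare suffixes.
--         full_first = options[0]
--         if actual == full_first:
--             return True
--         for alt in options[1:]:
--             if actual == alt: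
--                 return True
--             # "refused" is the canonical "clarify" outcome
--             if alt == "clarify" and actual == "refused":
--                 return True
--     return False
-- ===== SOURCE B (Python) =====
-- def _alt_matches(rest: str, actual: str) -> bool:
--     # Peel one bare alternative off the front of the remaining tail.
--     alt, sep, more = rest.partition("_or_")
--     if actual == alt or (alt == "clarify" and actual == "refused"):
--         return True
--     if not sep:
--         return False
--     return _alt_matches(more, actual)
--
--
-- def _outcome_matches(expected: str, actual: str) -> bool:
--     # Recursive single pass: peel the first (full) option off with str.partition
--     # and recurse over the remaining bare alternatives; no options list is built.
--     if expected == actual: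
--         return True
--     full_first, sep, rest = expected.partition("_or_")
--     if not sep:
--         return False
--     if actual == full_first:
--         return True
--     return _alt_matches(rest, actual)
-- ===== Notes on version B (the rewrite author's own statement) =====
-- stated objective: alternative
-- what changed: A materializes the whole options list with split('_or_') and then scans it with an early-return loop; B never builds that list: it recursively peels one alternative at a time off the string with str.partition and decides each piece as it goes.
import Mathlib
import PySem

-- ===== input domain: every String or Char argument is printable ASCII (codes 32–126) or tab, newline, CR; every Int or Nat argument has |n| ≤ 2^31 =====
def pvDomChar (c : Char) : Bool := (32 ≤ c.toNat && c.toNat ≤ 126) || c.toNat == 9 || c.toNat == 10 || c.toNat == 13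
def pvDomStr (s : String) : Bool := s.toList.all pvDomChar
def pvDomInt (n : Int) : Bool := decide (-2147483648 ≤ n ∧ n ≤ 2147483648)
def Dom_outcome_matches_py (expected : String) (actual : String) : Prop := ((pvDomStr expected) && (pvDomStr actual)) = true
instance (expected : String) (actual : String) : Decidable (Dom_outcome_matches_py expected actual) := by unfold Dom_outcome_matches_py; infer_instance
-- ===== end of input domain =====

-- B replaces A's split-into-a-list-then-scan by a recursive single pass that peels one
-- alternative at a time off the string with str.partition (objective: alternative).

-- the separator "_or_" as a char list (used by both ports)
def pvSep : List Char := "_or_".toList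

-- ===== PORT A =====
-- the 'for alt in options[1:]' loop with its early returns (over the split pieces)
def pvLoopA (actual : List Char) : List (List Char) → Bool
  | [] => false
  | alt :: rest =>
    if actual == alt then true
    else if alt == "clarify".toList && actual == "refused".toList then true
    else pvLoopA actual rest

def outcome_matches_py (expected : String) (actual : String) : Bool :=
  if expected == actual then true
  else if PySem.Str.isIn "_or_" expected then
    -- expected.split("_or_"); the pieces are compared as char lists (string == is code-point equality)
    let options := PySem.Chars.splitOn expected.toList pvSep
    let full_first := options.headD []
    if actual.toList == full_first then true
    else pvLoopA actual.toList (options.drop 1)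
  else false

-- ===== PORT B =====
-- hand port of CPython's str.partition(sep) for sep = "_or_": first occurrence via find;
-- exact: (s[:i], True, s[i+len(sep):]) if found, else (s, False, '')
def pvPartitionC (s : List Char) : List Char × Bool × List Char :=
  let i := PySem.Chars.find s pvSep
  if i < 0 then (s, false, [])
  else (s.take i.toNat, true, s.drop (i.toNat + pvSep.length))

-- termination fact for the recursion in _alt_matches: a found partition strictly shrinks the tail
theorem pvPartitionC_snd_length (s : List Char) (h : (pvPartitionC s).2.1 = true) :
    (pvPartitionC s).2.2.length < s.length := by
  unfold pvPartitionC at *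
  by_cases hlt : PySem.Chars.find s pvSep < 0
  · simp [hlt] at h
  · have hnn : 0 ≤ PySem.Chars.find s pvSep := le_of_not_gt hlt
    obtain ⟨hp, -⟩ := PySem.Chars.find_spec hnn
    have hlen := hp.length_le
    simp only [List.length_drop] at hlen
    have hsep : pvSep.length = 4 := rfl
    simp only [hlt, if_false, List.length_drop]
    omega

-- port of the recursive helper _alt_matches(rest, actual)
def pvAltMatches (rest actual : List Char) : Bool :=
  let p := pvPartitionC rest
  if actual == p.1 || (p.1 == "clarify".toList && actual == "refused".toList) then true
  else if h : p.2.1 = true then pvAltMatches p.2.2 actual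
  else false
termination_by rest.length
decreasing_by exact pvPartitionC_snd_length rest h

def outcome_matches_py_alt (expected : String) (actual : String) : Bool :=
  if expected == actual then true
  else
    let p := pvPartitionC expected.toList
    if !p.2.1 then false
    else if actual.toList == p.1 then true
    else pvAltMatches p.2.2 actual.toList

-- ===== PRECONDITION & SPEC =====
def Spec_outcome_matches_py (expected : String) (actual : String) (out : Bool) : Prop := out = outcome_matches_py_alt expected actual
instance (expected : String) (actual : String) (out : Bool) : Decidable (Spec_outcome_matches_py expected actual out) := by unfold Spec_outcome_matches_py; infer_instance

-- ===== CLAIM (what is proved, stated in full; the proofs are below) =====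
def Claim_equal_outcome_matches_py : Prop := ∀ (expected : String) (actual : String), Dom_outcome_matches_py expected actual → Spec_outcome_matches_py expected actual (outcome_matches_py expected actual)

-- ===== LEMMAS AND PROOFS =====

-- the split of s at successive first occurrences of "_or_" (proof-only reference form)
def pvSplitF (s : List Char) : List (List Char) :=
  let i := PySem.Chars.find s pvSep
  if h : 0 ≤ i then
    s.take i.toNat :: pvSplitF (s.drop (i.toNat + pvSep.length))
  else [s]
termination_by s.length
decreasing_by
  have hp := (PySem.Chars.find_spec h).1.length_le
  simp only [List.length_drop] at hp ⊢
  have hsep : pvSep.length = 4 := rfl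
  omega

theorem pvSplitF_ne_nil (s : List Char) : pvSplitF s ≠ [] := by
  rw [pvSplitF.eq_def]
  by_cases h : 0 ≤ PySem.Chars.find s pvSep <;> simp [h]

def pvPre (cur : List Char) : List (List Char) → List (List Char)
  | [] => [cur]
  | x :: xs => (cur ++ x) :: xs

theorem pvPre_nil (ys : List (List Char)) (h : ys ≠ []) : pvPre [] ys = ys := by
  cases ys with
  | nil => exact absurd rfl h
  | cons x xs => simp [pvPre]

-- find points at k iff sep is a prefix at k and nowhere earlier
theorem pvFind_eq_of (s : List Char) (k : Nat) (h1 : pvSep <+: s.drop k)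
    (h2 : ∀ j < k, ¬ pvSep <+: s.drop j) : PySem.Chars.find s pvSep = k := by
  have hinf : pvSep <:+: s := h1.isInfix.trans (List.drop_suffix k s).isInfix
  have hnn : 0 ≤ PySem.Chars.find s pvSep := (PySem.Chars.find_nonneg_iff _ _).mpr hinf
  obtain ⟨hp, hmin⟩ := PySem.Chars.find_spec hnn
  have hik : (PySem.Chars.find s pvSep).toNat = k := by
    rcases lt_trichotomy (PySem.Chars.find s pvSep).toNat k with h | h | h
    · exact absurd hp (h2 _ h)
    · exact h
    · exact absurd h1 (hmin k h)
  omega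

theorem pvFind_cons_neg (c : Char) (rest : List Char) (hp : ¬ pvSep <+: (c :: rest))
    (hr : PySem.Chars.find rest pvSep < 0) : PySem.Chars.find (c :: rest) pvSep < 0 := by
  have h1 : ¬ pvSep <:+: rest := by
    rw [← PySem.Chars.find_eq_neg_one_iff]
    have := PySem.Chars.neg_one_le_find rest pvSep
    omega
  have h2 : ¬ pvSep <:+: (c :: rest) := by
    rw [List.infix_cons_iff]
    rintro (h | h)
    · exact hp h
    · exact h1 h
  have := (PySem.Chars.find_eq_neg_one_iff (c :: rest) pvSep).mpr h2
  omega

theorem pvFind_cons_pos (c : Char) (rest : List Char) (hp : ¬ pvSep <+: (c :: rest))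
    (hr : 0 ≤ PySem.Chars.find rest pvSep) :
    PySem.Chars.find (c :: rest) pvSep = PySem.Chars.find rest pvSep + 1 := by
  obtain ⟨hpre, hmin⟩ := PySem.Chars.find_spec hr
  have h := pvFind_eq_of (c :: rest) ((PySem.Chars.find rest pvSep).toNat + 1)
    (by simpa using hpre)
    (by
      intro j hj
      cases j with
      | zero => simpa using hp
      | succ j' => simpa using hmin j' (by omega))
  omega

theorem pvSplitF_cons (s : List Char) (h : 0 ≤ PySem.Chars.find s pvSep) :
    pvSplitF s = s.take (PySem.Chars.find s pvSep).toNat ::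
      pvSplitF (s.drop ((PySem.Chars.find s pvSep).toNat + pvSep.length)) := by
  rw [pvSplitF]; simp [h]

theorem pvSplitF_single (s : List Char) (h : PySem.Chars.find s pvSep < 0) :
    pvSplitF s = [s] := by
  rw [pvSplitF.eq_def]; simp [not_le.mpr h]

-- the splitOn scanner computes pvSplitF
theorem pvGo_eq (fuel : Nat) : ∀ (l cur : List Char) (acc : List (List Char)),
    l.length < fuel →
    PySem.Chars.splitOn.go pvSep fuel l cur acc = acc.reverse ++ pvPre cur.reverse (pvSplitF l) := by
  induction fuel with
  | zero => intro l cur acc h; omega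
  | succ f ih =>
    intro l cur acc h
    cases l with
    | nil =>
      rw [PySem.Chars.splitOn.go]
      have : PySem.Chars.find ([] : List Char) pvSep < 0 := by decide
      rw [pvSplitF_single _ this]
      simp [pvPre]
      omega
    | cons c rest =>
      rw [PySem.Chars.splitOn.go]
      split
      · rename_i hpre
        have hpre' : pvSep <+: (c :: rest) := List.isPrefixOf_iff_prefix.mp hpre
        have hf0 : PySem.Chars.find (c :: rest) pvSep = 0 :=
          pvFind_eq_of _ 0 (by simpa using hpre') (by omega)
        have hlen := hpre'.length_le
        have hsep : pvSep.length = 4 := rfl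
        rw [pvSplitF_cons (c :: rest) (by omega), hf0]
        rw [ih _ _ _ (by simp only [List.length_drop]; omega)]
        simp [pvPre]
        rcases hys : pvSplitF (List.drop pvSep.length (c :: rest)) with _ | ⟨y, ys⟩
        · exact absurd hys (pvSplitF_ne_nil _)
        · rfl
      · rename_i hpre
        have hpre' : ¬ pvSep <+: (c :: rest) := fun hc => hpre (List.isPrefixOf_iff_prefix.mpr hc)
        rw [ih _ _ _ (by simp only [List.length_cons] at h; omega)]
        by_cases hr : 0 ≤ PySem.Chars.find rest pvSep
        · have hc := pvFind_cons_pos c rest hpre' hr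
          rw [pvSplitF_cons (c :: rest) (by omega), pvSplitF_cons rest hr, hc]
          have ht : (PySem.Chars.find rest pvSep + 1).toNat = (PySem.Chars.find rest pvSep).toNat + 1 := by omega
          have hd : (PySem.Chars.find rest pvSep).toNat + 1 + pvSep.length
              = ((PySem.Chars.find rest pvSep).toNat + pvSep.length) + 1 := by omega
          simp [ht, pvPre, hd]
        · have hc := pvFind_cons_neg c rest hpre' (by omega)
          rw [pvSplitF_single _ hc, pvSplitF_single _ (by omega)]
          simp [pvPre]

theorem pvSplitOn_eq (s : List Char) : PySem.Chars.splitOn s pvSep = pvSplitF s := by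
  unfold PySem.Chars.splitOn
  rw [pvGo_eq (s.length + 1) s [] [] (by omega)]
  simp [pvPre_nil _ (pvSplitF_ne_nil s)]

-- B's recursive helper agrees with A's loop over the split pieces
theorem pvAltMatches_eq (rest actual : List Char) :
    pvAltMatches rest actual = pvLoopA actual (pvSplitF rest) := by
  have hCL : "clarify".toList = ['c','l','a','r','i','f','y'] := rfl
  have hRF : "refused".toList = ['r','e','f','u','s','e','d'] := rfl
  by_cases hr : 0 ≤ PySem.Chars.find rest pvSep
  · have hP : pvPartitionC rest =
        (rest.take (PySem.Chars.find rest pvSep).toNat, true,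
         rest.drop ((PySem.Chars.find rest pvSep).toNat + pvSep.length)) := by
      unfold pvPartitionC; simp [not_lt.mpr hr]
    have ih := pvAltMatches_eq (rest.drop ((PySem.Chars.find rest pvSep).toNat + pvSep.length)) actual
    rw [pvAltMatches.eq_def, pvSplitF_cons rest hr, hP]
    simp only [pvLoopA, hCL, hRF]
    by_cases h1 : actual = rest.take (PySem.Chars.find rest pvSep).toNat
    · simp [h1]
    · by_cases h2 : rest.take (PySem.Chars.find rest pvSep).toNat = ['c','l','a','r','i','f','y'] ∧
          actual = ['r','e','f','u','s','e','d']
      · simp [h2.1, h2.2]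
      · have hg : (rest.take (PySem.Chars.find rest pvSep).toNat == ['c','l','a','r','i','f','y']
            && actual == ['r','e','f','u','s','e','d']) = false := by
          rcases not_and_or.mp h2 with h | h <;> simp [h]
        simp [beq_eq_false_iff_ne.mpr h1, hg, ih]
  · have hP : pvPartitionC rest = (rest, false, []) := by
      unfold pvPartitionC; simp [show PySem.Chars.find rest pvSep < 0 by omega]
    rw [pvAltMatches.eq_def, pvSplitF_single rest (by omega), hP]
    simp only [pvLoopA, hCL, hRF]
    by_cases h1 : actual = rest
    · simp [h1]
    · by_cases h2 : rest = ['c','l','a','r','i','f','y'] ∧ actual = ['r','e','f','u','s','e','d']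
      · simp [h2.1, h2.2]
      · have hg : (rest == ['c','l','a','r','i','f','y'] && actual == ['r','e','f','u','s','e','d']) = false := by
          rcases not_and_or.mp h2 with h | h <;> simp [h]
        simp [beq_eq_false_iff_ne.mpr h1, hg]
termination_by rest.length
decreasing_by
  have hlt := pvPartitionC_snd_length rest (by rw [hP])
  rw [hP] at hlt
  exact hlt

-- ===== VERDICT (by name: the statement is the Claim_ definition above) =====
theorem outcome_matches_py_spec : Claim_equal_outcome_matches_py := by
  intro expected actual _
  unfold Spec_outcome_matches_py outcome_matches_py outcome_matches_py_alt
  by_cases he : expected == actual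
  · simp [he]
  · simp only [he, Bool.false_eq_true, if_false]
    by_cases hin : PySem.Str.isIn "_or_" expected = true
    · have hinf : pvSep <:+: expected.toList := by
        have := (PySem.Str.isIn_iff_infix "_or_" expected).mp hin
        simpa [pvSep] using this
      have hr : 0 ≤ PySem.Chars.find expected.toList pvSep :=
        (PySem.Chars.find_nonneg_iff _ _).mpr hinf
      have hP : pvPartitionC expected.toList =
          (expected.toList.take (PySem.Chars.find expected.toList pvSep).toNat, true,
           expected.toList.drop ((PySem.Chars.find expected.toList pvSep).toNat + pvSep.length)) := by
        unfold pvPartitionC; simp [not_lt.mpr hr]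
      simp only [hin, if_true, hP, pvSplitOn_eq, pvSplitF_cons _ hr, List.headD_cons,
        List.drop_one, List.tail_cons, Bool.not_true, Bool.false_eq_true, if_false,
        pvAltMatches_eq]
    · have hninf : ¬ pvSep <:+: expected.toList := by
        intro hc
        exact hin ((PySem.Str.isIn_iff_infix "_or_" expected).mpr (by simpa [pvSep] using hc))
      have hr : PySem.Chars.find expected.toList pvSep < 0 := by
        have h := (PySem.Chars.find_eq_neg_one_iff expected.toList pvSep).mpr hninf
        omega
      have hP : pvPartitionC expected.toList = (expected.toList, false, []) := by
        unfold pvPartitionC; simp [hr]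
      have hin' : PySem.Chars.isIn ['_', 'o', 'r', '_'] expected.toList = false :=
        (PySem.Chars.isIn_eq_false_iff _ _).mpr hninf
      simp [hin', hP]
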